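-- pv_equiv track=rewrite | github.com/rdj/advent_py | 2025/2025-03/aoc.py | best_joltage
-- ===== SOURCE A (Python) =====
-- def best_joltage(b):
--     for n1 in range(9, 0, -1):
--         try:
--             i = b[:-1].index(n1)
--             n2 = max(b[i+1:])
--             return n1 * 10 + n2
--         except:
--             continue
--     raise Exception("nope")
-- ===== SOURCE B (Python) =====
-- def best_joltage(b):
--     pre = b[:-1]
--     candidates = [x for x in pre if 1 <= x <= 9]
--     if not candidates:
--         raise Exception("nope")
--     n1 = max(candidates)
--     i = pre.index(n1)
--     n2 = max(b[i+1:])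
--     return n1 * 10 + n2
-- ===== Notes on version B (the rewrite author's own statement) =====
-- stated objective: simpler
-- what changed: Replaces the 9..1 countdown with try/except-driven repeated scans by a single filter of the eligible prefix digits, one max to pick n1, one index lookup, and one max for n2.
import Mathlib
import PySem

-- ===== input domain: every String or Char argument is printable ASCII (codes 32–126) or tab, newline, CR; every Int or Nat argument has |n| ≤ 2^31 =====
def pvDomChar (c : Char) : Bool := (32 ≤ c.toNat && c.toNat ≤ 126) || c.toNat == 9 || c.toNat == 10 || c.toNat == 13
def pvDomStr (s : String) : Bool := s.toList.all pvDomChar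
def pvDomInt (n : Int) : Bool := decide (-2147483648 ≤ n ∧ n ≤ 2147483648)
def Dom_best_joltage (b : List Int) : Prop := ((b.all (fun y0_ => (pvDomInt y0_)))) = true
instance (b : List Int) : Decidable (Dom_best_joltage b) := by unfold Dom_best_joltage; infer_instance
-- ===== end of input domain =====

-- B replaces A's 9..1 countdown of try/except scans by filter + max + index + max; same values, no speed claim.
-- Both programs raise Exception("nope") when no element of b[:-1] is a digit 1..9; Pre_ excludes exactly those inputs.

-- ===== PORT A =====
-- one iteration of A's loop body: the try-block; none = an exception was raised (caught by the bare except)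
def bjTry (b : List Int) (n1 : Int) : Option Int :=
  match PySem.List.index? (PySem.List.slice b none (some (-1))) n1 with
  | none => none
  | some i =>
    match PySem.List.max? (PySem.List.slice b (some ((i : Int) + 1)) none) (fun x => x) with
    | none => none
    | some n2 => some (n1 * 10 + n2)

def bjLoop (b : List Int) : List Int → Option Int
  | [] => none
  | n1 :: rest =>
    match bjTry b n1 with
    | some r => some r
    | none => bjLoop b rest

def best_joltage (b : List Int) : Int :=
  (bjLoop b (PySem.List.pyRange 9 0 (-1))).getD 0   -- none = A raises Exception("nope"); excluded by Pre_

-- ===== PORT B =====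
def best_joltage_alt (b : List Int) : Int :=
  let pre := PySem.List.slice b none (some (-1))
  let candidates := pre.filter (fun x => decide (1 ≤ x ∧ x ≤ 9))
  match PySem.List.max? candidates (fun x => x) with
  | none => 0   -- B raises Exception("nope"); excluded by Pre_
  | some n1 =>
    let i := (PySem.List.index? pre n1).getD 0
    let n2 := (PySem.List.max? (PySem.List.slice b (some ((i : Int) + 1)) none) (fun x => x)).getD 0
    n1 * 10 + n2

-- ===== PRECONDITION & SPEC =====
-- Pre_ excludes exactly the inputs where A (and B) raise Exception("nope"): no element of b[:-1] lies in 1..9.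
def Pre_best_joltage (b : List Int) : Prop := ∃ x ∈ b.dropLast, 1 ≤ x ∧ x ≤ 9
instance (b : List Int) : Decidable (Pre_best_joltage b) := by unfold Pre_best_joltage; infer_instance
def pvWitness_best_joltage : List Int := [3, 1, 7]

def Spec_best_joltage (b : List Int) (out : Int) : Prop := out = best_joltage_alt b
instance (b : List Int) (out : Int) : Decidable (Spec_best_joltage b out) := by unfold Spec_best_joltage; infer_instance

-- ===== CLAIM (what is proved, stated in full; the proofs are below) =====
def Claim_equal_best_joltage : Prop := ∀ (b : List Int), Dom_best_joltage b → Pre_best_joltage b → Spec_best_joltage b (best_joltage b)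

-- ===== LEMMAS AND PROOFS =====

-- A's loop returns some r as soon as the first n1 in 9..1 succeeds
theorem bjLoop_find (b : List Int) (r : Int) (m : Int) (h1 : 1 ≤ m) (h9 : m ≤ 9)
    (hfail : ∀ n : Int, m < n → n ≤ 9 → bjTry b n = none)
    (hsucc : bjTry b m = some r) :
    bjLoop b (PySem.List.pyRange 9 0 (-1)) = some r := by
  have hr : PySem.List.pyRange 9 0 (-1) = [9, 8, 7, 6, 5, 4, 3, 2, 1] := by decide
  rw [hr]
  interval_cases m
  · simp [bjLoop, hsucc, hfail 9 (by norm_num) (by norm_num), hfail 8 (by norm_num) (by norm_num), hfail 7 (by norm_num) (by norm_num), hfail 6 (by norm_num) (by norm_num), hfail 5 (by norm_num) (by norm_num), hfail 4 (by norm_num) (by norm_num), hfail 3 (by norm_num) (by norm_num), hfail 2 (by norm_num) (by norm_num)]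
  · simp [bjLoop, hsucc, hfail 9 (by norm_num) (by norm_num), hfail 8 (by norm_num) (by norm_num), hfail 7 (by norm_num) (by norm_num), hfail 6 (by norm_num) (by norm_num), hfail 5 (by norm_num) (by norm_num), hfail 4 (by norm_num) (by norm_num), hfail 3 (by norm_num) (by norm_num)]
  · simp [bjLoop, hsucc, hfail 9 (by norm_num) (by norm_num), hfail 8 (by norm_num) (by norm_num), hfail 7 (by norm_num) (by norm_num), hfail 6 (by norm_num) (by norm_num), hfail 5 (by norm_num) (by norm_num), hfail 4 (by norm_num) (by norm_num)]
  · simp [bjLoop, hsucc, hfail 9 (by norm_num) (by norm_num), hfail 8 (by norm_num) (by norm_num), hfail 7 (by norm_num) (by norm_num), hfail 6 (by norm_num) (by norm_num), hfail 5 (by norm_num) (by norm_num)]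
  · simp [bjLoop, hsucc, hfail 9 (by norm_num) (by norm_num), hfail 8 (by norm_num) (by norm_num), hfail 7 (by norm_num) (by norm_num), hfail 6 (by norm_num) (by norm_num)]
  · simp [bjLoop, hsucc, hfail 9 (by norm_num) (by norm_num), hfail 8 (by norm_num) (by norm_num), hfail 7 (by norm_num) (by norm_num)]
  · simp [bjLoop, hsucc, hfail 9 (by norm_num) (by norm_num), hfail 8 (by norm_num) (by norm_num)]
  · simp [bjLoop, hsucc, hfail 9 (by norm_num) (by norm_num)]
  · simp [bjLoop, hsucc]

-- ===== VERDICT (by name: the statement is the Claim_ definition above) =====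
theorem best_joltage_spec : Claim_equal_best_joltage := by
  intro b _ hpre
  obtain ⟨x, hxmem, hx1, hx9⟩ := hpre
  set pre := b.dropLast with hpredef
  set cand := pre.filter (fun x => decide (1 ≤ x ∧ x ≤ 9)) with hcanddef
  have hxc : x ∈ cand := by
    rw [hcanddef, List.mem_filter]
    exact ⟨hxmem, by simp [hx1, hx9]⟩
  have hcne : cand ≠ [] := List.ne_nil_of_mem hxc
  obtain ⟨n1, hmax⟩ : ∃ n1, PySem.List.max? cand (fun x => x) = some n1 := by
    cases h : PySem.List.max? cand (fun x => x) with
    | none => exact absurd ((PySem.List.max?_eq_none_iff _ _).mp h) hcne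
    | some v => exact ⟨v, rfl⟩
  have hn1c : n1 ∈ cand := PySem.List.max?_mem hmax
  have hn1pre : n1 ∈ pre := (List.mem_filter.mp hn1c).1
  have hn1range : 1 ≤ n1 ∧ n1 ≤ 9 := by
    have := (List.mem_filter.mp hn1c).2
    simpa using this
  have hn1max : ∀ y ∈ cand, y ≤ n1 := fun y hy => PySem.List.max?_isMax hmax y hy
  obtain ⟨i, hidx⟩ : ∃ i, PySem.List.index? pre n1 = some i := by
    cases h : PySem.List.index? pre n1 with
    | none => exact absurd ((PySem.List.index?_eq_none_iff _ _).mp h) (by simp [hn1pre])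
    | some v => exact ⟨v, rfl⟩
  obtain ⟨hilt, -, -⟩ := PySem.List.getElem_of_index?_eq_some hidx
  have hlenpre : pre.length = b.length - 1 := by simp [hpredef]
  have hprene : pre ≠ [] := List.ne_nil_of_mem hn1pre
  have hpos : 0 < pre.length := List.length_pos_of_ne_nil hprene
  have hblen : i + 1 < b.length := by omega
  have hslice : PySem.List.slice b (some ((i : Int) + 1)) none = b.drop (i + 1) := by
    have hcast : ((i : Int) + 1) = ((i + 1 : Nat) : Int) := by push_cast; ring
    rw [hcast, PySem.List.slice_from_natCast]
  have hdropne : b.drop (i + 1) ≠ [] := by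
    simp only [ne_eq, List.drop_eq_nil_iff]
    omega
  obtain ⟨n2, hmax2⟩ : ∃ n2, PySem.List.max? (b.drop (i + 1)) (fun x => x) = some n2 := by
    cases h : PySem.List.max? (b.drop (i + 1)) (fun x => x) with
    | none => exact absurd ((PySem.List.max?_eq_none_iff _ _).mp h) hdropne
    | some v => exact ⟨v, rfl⟩
  have hsucc : bjTry b n1 = some (n1 * 10 + n2) := by
    unfold bjTry
    simp only [PySem.List.slice_to_neg_one, ← hpredef, hidx, hslice, hmax2]
  have hfail : ∀ n : Int, n1 < n → n ≤ 9 → bjTry b n = none := by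
    intro n hgt hle
    have hnot : n ∉ pre := by
      intro hmem
      have hnc : n ∈ cand := by
        rw [hcanddef, List.mem_filter]
        exact ⟨hmem, by simp; omega⟩
      exact absurd (hn1max n hnc) (by omega)
    unfold bjTry
    rw [PySem.List.slice_to_neg_one, ← hpredef, (PySem.List.index?_eq_none_iff _ _).mpr hnot]
  have hloop := bjLoop_find b (n1 * 10 + n2) n1 hn1range.1 hn1range.2 hfail hsucc
  unfold Spec_best_joltage best_joltage best_joltage_alt
  simp only [PySem.List.slice_to_neg_one, ← hpredef, ← hcanddef, hloop, hmax, hidx,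
    Option.getD_some, hslice, hmax2]
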